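-- pv_equiv track=rewrite | github.com/deepamgupta/attendance-taker | main.py | eveluate_attendance
-- ===== SOURCE A (Python) =====
-- def eveluate_attendance(present_students_list):
--     attendance = {
--         "PARIJAT SINGH KUBREY": " ",
--         "HARSH VARDHAN": " ",
--         "SUSHIL SINGH": " ",
--         "VIVEK KULASTE": " ",
--         "ABHINAV PANDEY": " ",
--         "ADYA TRISAL": " ",
--         "AISHWARYA AGRAWAL": " ",
--         "AKSHAT KARODIYA": " ",
--         "ALINOOR MULTANI": " ",
--         "AMAN NAGLE": " ",
--         "ANURAG GRIYAM": " ",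
--         "ASHUTOSH SINGH": " ",
--         "ASHUTOSH VERMA": " ",
--         "ASHVITA PATIDAR": " ",
--         "AYUSH KOTWALLA": " ",
--         "DEEP KOTHARI": " ",
--         "DEEPAM GUPTA": " ",
--         "DEV KUMAR": " ",
--         "DIGVIJAY VERMA": " ",
--         "DIVYA LAKHOTIA": " ",
--         "EESHWARI BHATORE": " ",
--         "GURUCHARAN PURTE": " ",
--         "HARISH BHABHAR": " ",
--         "HARISH PARMAR": " ",
--         "HARSHITA BHOMADIYA": " ",
--         "ISHITA JAIN": " ",
--         "JASMAN JATAV": " ",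
--         "JATIN GUPTA": " ",
--         "KRISHNA LOHARE": " ",
--         "LOKENDRA MANDLOI": " ",
--         "MADHUSUDAN YADAV": " ",
--         "MANISH JHAMELE": " ",
--         "NEHA DAWAR": " ",
--         "NILAY OSTWAL": " ",
--         "NITI MANGWANI": " ",
--         "PARTH ARORA": " ",
--         "PRADYUMNA UPADHYAY": " ",
--         "PRATIBHA CHOUHAN": " ",
--         "PRATIK MEHTA": " ",
--         "PRIYANSH TIWARI": " ",
--         "RAHUL WASKALE": " ",
--         "RAJAT KARAHE": " ",
--         "RAKSHA ASTARE": " ",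
--         "RAMAN DHAKAR": " ",
--         "RASHI MALVIYA": " ",
--         "RISHAV THAKUR": " ",
--         "RITHIK PANDITA": " ",
--         "RUDRANSH CHOUDHARY": " ",
--         "SAGAR CHOUBEY": " ",
--         "SAMYAK JAIN": " ",
--         "SARTHAK JOSHI": " ",
--         "SARTHAK NEEMA": " ",
--         "SATYAM PATEL": " ",
--         "SHEETAL KOTHE": " ",
--         "SIDDHANT JAIN": " ",
--         "SONU GUPTA": " ",
--         "SUMIT KR SINGH": " ",
--         "TASHI AGRAWAL": " ",
--         "UNNATI DIXIT": " ",
--         "VANSHIKA SUNDRANI": " ",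
--         "VICKY NIGAM": " ",
--         "YASH SONI": " ",
--         "YOGESH SINGH": " ",
--         "KISHAN JOSHI": " ",
--         "JAINISHA KHOWAL": " ",
--         "AKANKSHA DUBEY": " ",
--         "ASHUTOSH BARDE": " ",
--         "AYUSH KARMA": " ",
--         "BHOOMIKA PANDEY": " ",
--         "DISHA KHARE": " ",
--         "KAMINI SINGH CHAUHAN ": " ",
--         "PRASHANT ARJARIYA": " ",
--         "PRATEEK ONKAR": " ",
--         "RAJNI YADAV": " ",
--         "RAVINDRA KUMAR KUSHWAHA": " ",
--         "SAKSHI CHAURASIYA": " ",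
--         "VIPUL PORWAL": " ",
--     }
--
--     for student in present_students_list:
--         if student in attendance:
--             attendance[student] = 'P'
--
--     return list(attendance.values())
-- ===== SOURCE B (Python) =====
-- def eveluate_attendance(present_students_list):
--     roster = [
--     "PARIJAT SINGH KUBREY",
--     "HARSH VARDHAN",
--     "SUSHIL SINGH",
--     "VIVEK KULASTE",
--     "ABHINAV PANDEY",
--     "ADYA TRISAL",
--     "AISHWARYA AGRAWAL",
--     "AKSHAT KARODIYA",
--     "ALINOOR MULTANI",
--     "AMAN NAGLE",
--     "ANURAG GRIYAM",
--     "ASHUTOSH SINGH",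
--     "ASHUTOSH VERMA",
--     "ASHVITA PATIDAR",
--     "AYUSH KOTWALLA",
--     "DEEP KOTHARI",
--     "DEEPAM GUPTA",
--     "DEV KUMAR",
--     "DIGVIJAY VERMA",
--     "DIVYA LAKHOTIA",
--     "EESHWARI BHATORE",
--     "GURUCHARAN PURTE",
--     "HARISH BHABHAR",
--     "HARISH PARMAR",
--     "HARSHITA BHOMADIYA",
--     "ISHITA JAIN",
--     "JASMAN JATAV",
--     "JATIN GUPTA",
--     "KRISHNA LOHARE",
--     "LOKENDRA MANDLOI",
--     "MADHUSUDAN YADAV",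
--     "MANISH JHAMELE",
--     "NEHA DAWAR",
--     "NILAY OSTWAL",
--     "NITI MANGWANI",
--     "PARTH ARORA",
--     "PRADYUMNA UPADHYAY",
--     "PRATIBHA CHOUHAN",
--     "PRATIK MEHTA",
--     "PRIYANSH TIWARI",
--     "RAHUL WASKALE",
--     "RAJAT KARAHE",
--     "RAKSHA ASTARE",
--     "RAMAN DHAKAR",
--     "RASHI MALVIYA",
--     "RISHAV THAKUR",
--     "RITHIK PANDITA",
--     "RUDRANSH CHOUDHARY",
--     "SAGAR CHOUBEY",
--     "SAMYAK JAIN",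
--     "SARTHAK JOSHI",
--     "SARTHAK NEEMA",
--     "SATYAM PATEL",
--     "SHEETAL KOTHE",
--     "SIDDHANT JAIN",
--     "SONU GUPTA",
--     "SUMIT KR SINGH",
--     "TASHI AGRAWAL",
--     "UNNATI DIXIT",
--     "VANSHIKA SUNDRANI",
--     "VICKY NIGAM",
--     "YASH SONI",
--     "YOGESH SINGH",
--     "KISHAN JOSHI",
--     "JAINISHA KHOWAL",
--     "AKANKSHA DUBEY",
--     "ASHUTOSH BARDE",
--     "AYUSH KARMA",
--     "BHOOMIKA PANDEY",
--     "DISHA KHARE",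
--     "KAMINI SINGH CHAUHAN ",
--     "PRASHANT ARJARIYA",
--     "PRATEEK ONKAR",
--     "RAJNI YADAV",
--     "RAVINDRA KUMAR KUSHWAHA",
--     "SAKSHI CHAURASIYA",
--     "VIPUL PORWAL",
--     ]
--     present = set(present_students_list)
--     return ['P' if name in present else ' ' for name in roster]
-- ===== Notes on version B (the rewrite author's own statement) =====
-- stated objective: simpler
-- what changed: B iterates over the fixed roster list with a precomputed set of present students instead of mutating a dict while looping over the input list.
import Mathlib
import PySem

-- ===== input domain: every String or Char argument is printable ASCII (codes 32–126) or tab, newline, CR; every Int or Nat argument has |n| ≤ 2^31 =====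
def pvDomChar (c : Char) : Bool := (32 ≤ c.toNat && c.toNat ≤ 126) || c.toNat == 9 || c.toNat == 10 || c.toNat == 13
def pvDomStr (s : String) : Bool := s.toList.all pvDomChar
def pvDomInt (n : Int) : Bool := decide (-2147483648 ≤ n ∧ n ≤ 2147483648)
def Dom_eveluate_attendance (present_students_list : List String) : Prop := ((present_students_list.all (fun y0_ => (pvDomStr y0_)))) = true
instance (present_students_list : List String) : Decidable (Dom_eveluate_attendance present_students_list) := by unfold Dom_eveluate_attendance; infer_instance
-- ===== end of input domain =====

-- B iterates over the fixed roster list with a precomputed set of present students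
-- instead of mutating a dict while looping over the input list (objective: simpler).

-- ===== PORT A =====
-- the dict literal (distinct keys, insertion order as written)
def pvAttendanceInit : PySem.Dict String String := PySem.Dict.mk [
    ("PARIJAT SINGH KUBREY", " "),
    ("HARSH VARDHAN", " "),
    ("SUSHIL SINGH", " "),
    ("VIVEK KULASTE", " "),
    ("ABHINAV PANDEY", " "),
    ("ADYA TRISAL", " "),
    ("AISHWARYA AGRAWAL", " "),
    ("AKSHAT KARODIYA", " "),
    ("ALINOOR MULTANI", " "),
    ("AMAN NAGLE", " "),
    ("ANURAG GRIYAM", " "),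
    ("ASHUTOSH SINGH", " "),
    ("ASHUTOSH VERMA", " "),
    ("ASHVITA PATIDAR", " "),
    ("AYUSH KOTWALLA", " "),
    ("DEEP KOTHARI", " "),
    ("DEEPAM GUPTA", " "),
    ("DEV KUMAR", " "),
    ("DIGVIJAY VERMA", " "),
    ("DIVYA LAKHOTIA", " "),
    ("EESHWARI BHATORE", " "),
    ("GURUCHARAN PURTE", " "),
    ("HARISH BHABHAR", " "),
    ("HARISH PARMAR", " "),
    ("HARSHITA BHOMADIYA", " "),
    ("ISHITA JAIN", " "),
    ("JASMAN JATAV", " "),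
    ("JATIN GUPTA", " "),
    ("KRISHNA LOHARE", " "),
    ("LOKENDRA MANDLOI", " "),
    ("MADHUSUDAN YADAV", " "),
    ("MANISH JHAMELE", " "),
    ("NEHA DAWAR", " "),
    ("NILAY OSTWAL", " "),
    ("NITI MANGWANI", " "),
    ("PARTH ARORA", " "),
    ("PRADYUMNA UPADHYAY", " "),
    ("PRATIBHA CHOUHAN", " "),
    ("PRATIK MEHTA", " "),
    ("PRIYANSH TIWARI", " "),
    ("RAHUL WASKALE", " "),
    ("RAJAT KARAHE", " "),
    ("RAKSHA ASTARE", " "),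
    ("RAMAN DHAKAR", " "),
    ("RASHI MALVIYA", " "),
    ("RISHAV THAKUR", " "),
    ("RITHIK PANDITA", " "),
    ("RUDRANSH CHOUDHARY", " "),
    ("SAGAR CHOUBEY", " "),
    ("SAMYAK JAIN", " "),
    ("SARTHAK JOSHI", " "),
    ("SARTHAK NEEMA", " "),
    ("SATYAM PATEL", " "),
    ("SHEETAL KOTHE", " "),
    ("SIDDHANT JAIN", " "),
    ("SONU GUPTA", " "),
    ("SUMIT KR SINGH", " "),
    ("TASHI AGRAWAL", " "),
    ("UNNATI DIXIT", " "),
    ("VANSHIKA SUNDRANI", " "),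
    ("VICKY NIGAM", " "),
    ("YASH SONI", " "),
    ("YOGESH SINGH", " "),
    ("KISHAN JOSHI", " "),
    ("JAINISHA KHOWAL", " "),
    ("AKANKSHA DUBEY", " "),
    ("ASHUTOSH BARDE", " "),
    ("AYUSH KARMA", " "),
    ("BHOOMIKA PANDEY", " "),
    ("DISHA KHARE", " "),
    ("KAMINI SINGH CHAUHAN ", " "),
    ("PRASHANT ARJARIYA", " "),
    ("PRATEEK ONKAR", " "),
    ("RAJNI YADAV", " "),
    ("RAVINDRA KUMAR KUSHWAHA", " "),
    ("SAKSHI CHAURASIYA", " "),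
    ("VIPUL PORWAL", " ")
  ]

def eveluate_attendance (present_students_list : List String) : List String :=
  (present_students_list.foldl
    (fun attendance student =>
      if attendance.contains student then attendance.insert student "P" else attendance)
    pvAttendanceInit).values

-- ===== PORT B =====
def pvRoster : List String := [
    "PARIJAT SINGH KUBREY",
    "HARSH VARDHAN",
    "SUSHIL SINGH",
    "VIVEK KULASTE",
    "ABHINAV PANDEY",
    "ADYA TRISAL",
    "AISHWARYA AGRAWAL",
    "AKSHAT KARODIYA",
    "ALINOOR MULTANI",
    "AMAN NAGLE",
    "ANURAG GRIYAM",
    "ASHUTOSH SINGH",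
    "ASHUTOSH VERMA",
    "ASHVITA PATIDAR",
    "AYUSH KOTWALLA",
    "DEEP KOTHARI",
    "DEEPAM GUPTA",
    "DEV KUMAR",
    "DIGVIJAY VERMA",
    "DIVYA LAKHOTIA",
    "EESHWARI BHATORE",
    "GURUCHARAN PURTE",
    "HARISH BHABHAR",
    "HARISH PARMAR",
    "HARSHITA BHOMADIYA",
    "ISHITA JAIN",
    "JASMAN JATAV",
    "JATIN GUPTA",
    "KRISHNA LOHARE",
    "LOKENDRA MANDLOI",
    "MADHUSUDAN YADAV",
    "MANISH JHAMELE",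
    "NEHA DAWAR",
    "NILAY OSTWAL",
    "NITI MANGWANI",
    "PARTH ARORA",
    "PRADYUMNA UPADHYAY",
    "PRATIBHA CHOUHAN",
    "PRATIK MEHTA",
    "PRIYANSH TIWARI",
    "RAHUL WASKALE",
    "RAJAT KARAHE",
    "RAKSHA ASTARE",
    "RAMAN DHAKAR",
    "RASHI MALVIYA",
    "RISHAV THAKUR",
    "RITHIK PANDITA",
    "RUDRANSH CHOUDHARY",
    "SAGAR CHOUBEY",
    "SAMYAK JAIN",
    "SARTHAK JOSHI",
    "SARTHAK NEEMA",
    "SATYAM PATEL",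
    "SHEETAL KOTHE",
    "SIDDHANT JAIN",
    "SONU GUPTA",
    "SUMIT KR SINGH",
    "TASHI AGRAWAL",
    "UNNATI DIXIT",
    "VANSHIKA SUNDRANI",
    "VICKY NIGAM",
    "YASH SONI",
    "YOGESH SINGH",
    "KISHAN JOSHI",
    "JAINISHA KHOWAL",
    "AKANKSHA DUBEY",
    "ASHUTOSH BARDE",
    "AYUSH KARMA",
    "BHOOMIKA PANDEY",
    "DISHA KHARE",
    "KAMINI SINGH CHAUHAN ",
    "PRASHANT ARJARIYA",
    "PRATEEK ONKAR",
    "RAJNI YADAV",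
    "RAVINDRA KUMAR KUSHWAHA",
    "SAKSHI CHAURASIYA",
    "VIPUL PORWAL"
  ]

def eveluate_attendance_alt (present_students_list : List String) : List String :=
  let present : PySem.Set String := PySem.Set.ofList present_students_list
  pvRoster.map (fun name => if present.contains name then "P" else " ")

-- ===== PRECONDITION & SPEC =====
def Spec_eveluate_attendance (present_students_list : List String) (out : List String) : Prop := out = eveluate_attendance_alt present_students_list
instance (present_students_list : List String) (out : List String) : Decidable (Spec_eveluate_attendance present_students_list out) := by unfold Spec_eveluate_attendance; infer_instance

-- ===== CLAIM (what is proved, stated in full; the proofs are below) =====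
def Claim_equal_eveluate_attendance : Prop := ∀ (present_students_list : List String), Dom_eveluate_attendance present_students_list → Spec_eveluate_attendance present_students_list (eveluate_attendance present_students_list)

-- ===== LEMMAS AND PROOFS =====

-- the attendance-marking loop sets exactly the values whose key occurs in the input list
lemma pv_foldl_values (ps : List String) (d : PySem.Dict String String) :
    (ps.foldl
      (fun attendance student =>
        if attendance.contains student then attendance.insert student "P" else attendance)
      d).values
      = d.items.map (fun p => if ps.contains p.1 then "P" else p.2) := by
  induction ps generalizing d with
  | nil => simp [PySem.Dict.values]
  | cons s ps ih =>
    simp only [List.foldl_cons]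
    rw [ih]
    by_cases h : d.contains s = true
    · rw [if_pos h, PySem.Dict.items_insert, if_pos h, List.map_map]
      apply List.map_congr_left
      intro p hp
      simp only [Function.comp]
      by_cases he : p.1 = s
      · simp [he]
      · simp [he, beq_iff_eq]
    · rw [if_neg h]
      apply List.map_congr_left
      intro p hp
      have hne : p.1 ≠ s := by
        intro he
        have := PySem.Dict.mem_keys_of_mem_items d hp
        rw [he, ← PySem.Dict.contains_iff_mem_keys] at this
        exact h this
      simp [hne]

theorem pv_main (ps : List String) :
    eveluate_attendance ps = eveluate_attendance_alt ps := by
  unfold eveluate_attendance eveluate_attendance_alt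
  rw [pv_foldl_values]
  have hitems : pvAttendanceInit.items = pvRoster.map (fun n => (n, " ")) := by rfl
  rw [hitems, List.map_map]
  apply List.map_congr_left
  intro n _
  simp [Function.comp, PySem.Set.contains]

-- ===== VERDICT (by name: the statement is the Claim_ definition above) =====
theorem eveluate_attendance_spec : Claim_equal_eveluate_attendance := by
  intro ps _
  unfold Spec_eveluate_attendance
  exact pv_main ps
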